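-- pv_equiv track=rewrite | github.com/skoolkid/contactsamcruise | skoolkit/samcruise.py | _rotate_tile_data
-- ===== SOURCE A (Python) =====
-- def _rotate_tile_data(tile_data):
--     tile = tile_data[0:16:2]
--     mask = tile_data[1:16:2]
--     rotated = []
--     b = 1
--     while b < 129:
--         rbyte = rmask = 0
--         for byte, mbyte in zip(tile, mask):
--             rbyte *= 2
--             rbyte += 1 if byte & b else 0
--             rmask *= 2
--             rmask += 1 if mbyte & b else 0
--         rotated.append(rbyte)
--         rotated.append(rmask)
--         b *= 2
--     return rotated
-- ===== SOURCE B (Python) =====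
-- def _rotate_tile_data(tile_data):
--     # Scatter transpose: walk the tile/mask byte pairs back-to-front with a
--     # doubling column weight and add each set bit straight into its output plane.
--     tile = tile_data[0:16:2]
--     mask = tile_data[1:16:2]
--     out = [0] * 16
--     w = 1
--     for t, u in reversed(list(zip(tile, mask))):
--         for k in range(8):
--             bm = 2 ** k
--             out[2 * k] += w if t & bm else 0
--             out[2 * k + 1] += w if u & bm else 0
--         w *= 2
--     return out
-- ===== Notes on version B (the rewrite author's own statement) =====
-- stated objective: alternative
-- what changed: A gathers each of the 8 output planes with a Horner-style doubling accumulator over the tile/mask byte pairs (8x8 nested passes, plane-major); B makes one scatter pass over the byte pairs in reverse with a doubling column weight, adding each set bit directly into a preallocated 16-slot output (column-major).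
import Mathlib
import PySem

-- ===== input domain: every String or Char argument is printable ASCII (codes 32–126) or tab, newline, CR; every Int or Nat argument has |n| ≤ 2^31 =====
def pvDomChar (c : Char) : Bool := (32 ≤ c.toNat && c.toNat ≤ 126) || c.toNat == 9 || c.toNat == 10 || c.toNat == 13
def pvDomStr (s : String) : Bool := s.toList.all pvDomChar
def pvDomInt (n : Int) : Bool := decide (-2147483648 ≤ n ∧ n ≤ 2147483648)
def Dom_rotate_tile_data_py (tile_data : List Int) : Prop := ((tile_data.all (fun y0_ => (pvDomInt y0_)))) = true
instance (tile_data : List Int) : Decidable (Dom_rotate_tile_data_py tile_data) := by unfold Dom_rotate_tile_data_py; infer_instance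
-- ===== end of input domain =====

-- B replaces A's gather (per output plane, a Horner-style fold over the byte pairs) by a
-- single scatter pass over reversed byte pairs with a doubling weight (objective: alternative).

-- ===== PORT A =====
-- the body of A's inner 'for byte, mbyte in zip(tile, mask)' loop: pair state (rbyte, rmask)
def pvAInner (b : Int) (pairs : List (Int × Int)) : Int × Int :=
  pairs.foldl (fun r p =>
    (r.1 * 2 + (if PySem.Int.band p.1 b ≠ 0 then (1 : Int) else 0),
     r.2 * 2 + (if PySem.Int.band p.2 b ≠ 0 then (1 : Int) else 0))) (0, 0)

-- A's 'while b < 129' loop; the '0 < b' conjunct is only a totality guard (b starts at 1 and doubles)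
def pvAGo (tile mask rotated : List Int) (b : Int) : List Int :=
  if h : 0 < b ∧ b < 129 then
    let r := pvAInner b (tile.zip mask)
    pvAGo tile mask (rotated ++ [r.1, r.2]) (b * 2)
  else rotated
termination_by (129 - b).toNat
decreasing_by omega

def rotate_tile_data_py (tile_data : List Int) : List Int :=
  let tile := (PySem.List.slice? tile_data (some 0) (some 16) 2).getD []  -- step ≠ 0: never none
  let mask := (PySem.List.slice? tile_data (some 1) (some 16) 2).getD []
  pvAGo tile mask [] 1

-- ===== PORT B =====
-- body of B's 'for k in range(8)' loop ('out[i] += x' as set i (getD i 0 + x); 2 ** k with k ≥ 0)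
def pvBInner (t u w : Int) (out : List Int) : List Int :=
  (PySem.List.pyRange 0 8 1).foldl (fun o k =>
    let bm : Int := 2 ^ k.toNat
    let o1 := o.set (2 * k).toNat (o.getD (2 * k).toNat 0 + (if PySem.Int.band t bm ≠ 0 then w else 0))
    o1.set (2 * k + 1).toNat (o1.getD (2 * k + 1).toNat 0 + (if PySem.Int.band u bm ≠ 0 then w else 0))) out

def rotate_tile_data_py_alt (tile_data : List Int) : List Int :=
  let tile := (PySem.List.slice? tile_data (some 0) (some 16) 2).getD []
  let mask := (PySem.List.slice? tile_data (some 1) (some 16) 2).getD []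
  let st := ((tile.zip mask).reverse).foldl
    (fun (st : List Int × Int) p => (pvBInner p.1 p.2 st.2 st.1, st.2 * 2))
    (List.replicate 16 0, 1)
  st.1

-- ===== PRECONDITION & SPEC =====
def Spec_rotate_tile_data_py (tile_data : List Int) (out : List Int) : Prop := out = rotate_tile_data_py_alt tile_data
instance (tile_data : List Int) (out : List Int) : Decidable (Spec_rotate_tile_data_py tile_data out) := by unfold Spec_rotate_tile_data_py; infer_instance

-- ===== CLAIM (what is proved, stated in full; the proofs are below) =====
def Claim_equal_rotate_tile_data_py : Prop := ∀ (tile_data : List Int), Dom_rotate_tile_data_py tile_data → Spec_rotate_tile_data_py tile_data (rotate_tile_data_py tile_data)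

-- ===== LEMMAS AND PROOFS =====

-- the contribution w·[t & b ≠ 0]
def pvBit (t b w : Int) : Int := if PySem.Int.band t b ≠ 0 then w else 0

theorem pvBit_mul (t b w c : Int) : pvBit t b (w * c) = w * pvBit t b c := by
  unfold pvBit; split <;> ring

-- the transposed plane values for bit b: tile bytes (vt) and mask bytes (vm)
def pvVt (b : Int) : List (Int × Int) → Int
  | [] => 0
  | p :: l => pvBit p.1 b (2 ^ l.length) + pvVt b l

def pvVm (b : Int) : List (Int × Int) → Int
  | [] => 0
  | p :: l => pvBit p.2 b (2 ^ l.length) + pvVm b l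

theorem pvAInner_gen (b : Int) (l : List (Int × Int)) : ∀ a1 a2 : Int,
    l.foldl (fun r p =>
      (r.1 * 2 + (if PySem.Int.band p.1 b ≠ 0 then (1 : Int) else 0),
       r.2 * 2 + (if PySem.Int.band p.2 b ≠ 0 then (1 : Int) else 0))) (a1, a2)
    = (a1 * 2 ^ l.length + pvVt b l, a2 * 2 ^ l.length + pvVm b l) := by
  induction l with
  | nil => intro a1 a2; simp [pvVt, pvVm]
  | cons p l ih =>
    intro a1 a2
    simp only [List.foldl_cons, ih, pvVt, pvVm, List.length_cons]
    have h1 : (if PySem.Int.band p.1 b ≠ 0 then (1 : Int) else 0) * 2 ^ l.length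
        = pvBit p.1 b (2 ^ l.length) := by unfold pvBit; split <;> ring
    have h2 : (if PySem.Int.band p.2 b ≠ 0 then (1 : Int) else 0) * 2 ^ l.length
        = pvBit p.2 b (2 ^ l.length) := by unfold pvBit; split <;> ring
    refine Prod.ext ?_ ?_
    · rw [← h1]; ring
    · rw [← h2]; ring

theorem pvAInner_eq (b : Int) (l : List (Int × Int)) : pvAInner b l = (pvVt b l, pvVm b l) := by
  unfold pvAInner; rw [pvAInner_gen]; simp

theorem pvBInner_eval (t u w o0 o1 o2 o3 o4 o5 o6 o7 o8 o9 o10 o11 o12 o13 o14 o15 : Int) :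
    pvBInner t u w [o0, o1, o2, o3, o4, o5, o6, o7, o8, o9, o10, o11, o12, o13, o14, o15]
    = [o0 + pvBit t 1 w, o1 + pvBit u 1 w, o2 + pvBit t 2 w, o3 + pvBit u 2 w,
       o4 + pvBit t 4 w, o5 + pvBit u 4 w, o6 + pvBit t 8 w, o7 + pvBit u 8 w,
       o8 + pvBit t 16 w, o9 + pvBit u 16 w, o10 + pvBit t 32 w, o11 + pvBit u 32 w,
       o12 + pvBit t 64 w, o13 + pvBit u 64 w, o14 + pvBit t 128 w, o15 + pvBit u 128 w] := by
  rfl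

theorem pvBFold (l : List (Int × Int)) (w : Int)
    (o0 o1 o2 o3 o4 o5 o6 o7 o8 o9 o10 o11 o12 o13 o14 o15 : Int) :
    l.foldr (fun p st => (pvBInner p.1 p.2 st.2 st.1, st.2 * 2))
      ([o0, o1, o2, o3, o4, o5, o6, o7, o8, o9, o10, o11, o12, o13, o14, o15], w)
    = ([o0 + w * pvVt 1 l, o1 + w * pvVm 1 l, o2 + w * pvVt 2 l, o3 + w * pvVm 2 l,
        o4 + w * pvVt 4 l, o5 + w * pvVm 4 l, o6 + w * pvVt 8 l, o7 + w * pvVm 8 l,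
        o8 + w * pvVt 16 l, o9 + w * pvVm 16 l, o10 + w * pvVt 32 l, o11 + w * pvVm 32 l,
        o12 + w * pvVt 64 l, o13 + w * pvVm 64 l, o14 + w * pvVt 128 l, o15 + w * pvVm 128 l],
       w * 2 ^ l.length) := by
  induction l with
  | nil => simp [pvVt, pvVm]
  | cons p l ih =>
    simp only [List.foldr_cons, ih, pvBInner_eval, pvVt, pvVm, List.length_cons]
    refine Prod.ext ?_ ?_
    · simp only [List.cons.injEq, and_true]
      refine ⟨?_, ?_, ?_, ?_, ?_, ?_, ?_, ?_, ?_, ?_, ?_, ?_, ?_, ?_, ?_, ?_⟩ <;>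
        · rw [pvBit_mul]; ring
    · simp only []; ring

theorem pvAGo_step (tile mask rotated : List Int) (b b2 : Int) (h1 : 0 < b) (h2 : b < 129)
    (h3 : b2 = b * 2) :
    pvAGo tile mask rotated b
    = pvAGo tile mask (rotated ++ [pvVt b (tile.zip mask), pvVm b (tile.zip mask)]) b2 := by
  subst h3
  rw [pvAGo]
  simp [h1, h2, pvAInner_eq]

theorem pvAGo_end (tile mask rotated : List Int) : pvAGo tile mask rotated 256 = rotated := by
  rw [pvAGo]; norm_num

-- ===== VERDICT (by name: the statement is the Claim_ definition above) =====
theorem rotate_tile_data_py_spec : Claim_equal_rotate_tile_data_py := by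
  intro xs _
  unfold Spec_rotate_tile_data_py rotate_tile_data_py rotate_tile_data_py_alt
  simp only []
  rw [pvAGo_step _ _ _ 1 2 (by norm_num) (by norm_num) (by norm_num)]
  rw [pvAGo_step _ _ _ 2 4 (by norm_num) (by norm_num) (by norm_num)]
  rw [pvAGo_step _ _ _ 4 8 (by norm_num) (by norm_num) (by norm_num)]
  rw [pvAGo_step _ _ _ 8 16 (by norm_num) (by norm_num) (by norm_num)]
  rw [pvAGo_step _ _ _ 16 32 (by norm_num) (by norm_num) (by norm_num)]
  rw [pvAGo_step _ _ _ 32 64 (by norm_num) (by norm_num) (by norm_num)]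
  rw [pvAGo_step _ _ _ 64 128 (by norm_num) (by norm_num) (by norm_num)]
  rw [pvAGo_step _ _ _ 128 256 (by norm_num) (by norm_num) (by norm_num)]
  rw [pvAGo_end]
  rw [List.foldl_reverse]
  rw [show (List.replicate 16 (0 : Int)) = [0,0,0,0,0,0,0,0,0,0,0,0,0,0,0,0] from rfl]
  rw [pvBFold]
  norm_num
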